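-- pv_equiv track=rewrite | github.com/Edinburgh-iGEM2016/Lexicon-Encoding-and-Decoding | lexEncode.py | dnaToNum
-- ===== SOURCE A (Python) =====
-- def dnaToNum(dnaCode):
--     # converts dna sequence to equivalent number for use in orc
--     num = ""
--     for eachBase in dnaCode:
--         if eachBase == 'A':
--             num = num + '0'
--         elif eachBase == 'T':
--             num = num + '1'
--         elif eachBase == 'G':
--             num = num + '2'
--         elif eachBase == 'C':
--             num = num + '3'
--     return sum(map(int, num))
-- ===== SOURCE B (Python) =====
-- def dnaToNum(dnaCode):
--     # build a frequency table once, then a closed-form weighted sum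
--     freq = {}
--     for base in dnaCode:
--         freq[base] = freq.get(base, 0) + 1
--     return freq.get('T', 0) + 2 * freq.get('G', 0) + 3 * freq.get('C', 0)
-- ===== Notes on version B (the rewrite author's own statement) =====
-- stated objective: alternative
-- what changed: B replaces A's digit-string accumulation plus sum(map(int, ...)) by a single-pass frequency table followed by the closed-form weighted sum freq['T'] + 2*freq['G'] + 3*freq['C'].
import Mathlib
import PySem

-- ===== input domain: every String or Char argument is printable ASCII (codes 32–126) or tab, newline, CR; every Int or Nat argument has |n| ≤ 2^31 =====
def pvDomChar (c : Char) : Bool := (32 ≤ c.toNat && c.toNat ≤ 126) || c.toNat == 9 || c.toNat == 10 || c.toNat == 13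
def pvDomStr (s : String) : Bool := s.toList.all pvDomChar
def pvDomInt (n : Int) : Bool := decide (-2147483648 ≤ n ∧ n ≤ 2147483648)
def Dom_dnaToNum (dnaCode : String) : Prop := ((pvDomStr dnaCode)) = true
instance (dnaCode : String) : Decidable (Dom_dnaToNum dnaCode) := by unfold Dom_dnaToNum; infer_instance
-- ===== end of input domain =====

-- B replaces A's digit-string accumulation + sum(map(int,...)) by a one-pass frequency table
-- plus a constant-size weighted sum (objective: alternative).


-- ===== PORT A =====
-- the digit string `num`, built char by char exactly as A's loop does
def dnaToNumDigits (dnaCode : String) : List Char :=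
  dnaCode.toList.foldl
    (fun num c =>
      if c = 'A' then num ++ ['0']
      else if c = 'T' then num ++ ['1']
      else if c = 'G' then num ++ ['2']
      else if c = 'C' then num ++ ['3']
      else num) []

-- sum(map(int, num)); int(d) for the single digit chars num contains is exactly d.toNat - 48
def dnaToNum (dnaCode : String) : Int :=
  ((dnaToNumDigits dnaCode).map (fun d => ((d.toNat : Int) - 48))).sum

-- ===== PORT B =====
def dnaToNum_alt (dnaCode : String) : Int :=
  let freq : PySem.Dict Char Int :=
    dnaCode.toList.foldl (fun d b => d.insert b (d.getD b 0 + 1)) PySem.Dict.empty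
  freq.getD 'T' 0 + 2 * freq.getD 'G' 0 + 3 * freq.getD 'C' 0

-- ===== PRECONDITION & SPEC =====
def Spec_dnaToNum (dnaCode : String) (out : Int) : Prop := out = dnaToNum_alt dnaCode
instance (dnaCode : String) (out : Int) : Decidable (Spec_dnaToNum dnaCode out) := by unfold Spec_dnaToNum; infer_instance

-- ===== CLAIM (what is proved, stated in full; the proofs are below) =====
def Claim_equal_dnaToNum : Prop := ∀ (dnaCode : String), Dom_dnaToNum dnaCode → Spec_dnaToNum dnaCode (dnaToNum dnaCode)

-- ===== LEMMAS AND PROOFS =====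

-- A's loop followed by the digit sum equals the weighted count formula
theorem a_foldl_sum (l : List Char) (acc : List Char) :
    ((l.foldl
      (fun num c =>
        if c = 'A' then num ++ ['0']
        else if c = 'T' then num ++ ['1']
        else if c = 'G' then num ++ ['2']
        else if c = 'C' then num ++ ['3']
        else num) acc).map (fun d => ((d.toNat : Int) - 48))).sum
    = (acc.map (fun d => ((d.toNat : Int) - 48))).sum
      + (l.count 'T' : Int) + 2 * (l.count 'G' : Int) + 3 * (l.count 'C' : Int) := by
  induction l generalizing acc with
  | nil => simp
  | cons c l ih =>
    simp only [List.foldl_cons, List.count_cons]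
    split_ifs with h1 h2 h3 h4 <;>
      simp_all [List.map_append, List.sum_append] <;> ring

theorem dnaToNum_eq_counts (s : String) :
    dnaToNum s = (s.toList.count 'T' : Int) + 2 * (s.toList.count 'G' : Int)
      + 3 * (s.toList.count 'C' : Int) := by
  simpa using a_foldl_sum s.toList []

theorem dnaToNum_alt_eq_counts (s : String) :
    dnaToNum_alt s = (s.toList.count 'T' : Int) + 2 * (s.toList.count 'G' : Int)
      + 3 * (s.toList.count 'C' : Int) := by
  unfold dnaToNum_alt
  rw [PySem.Dict.foldl_insert_getD_add_one_eq_counter]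
  simp [PySem.Dict.getD_counter]

-- ===== VERDICT (by name: the statement is the Claim_ definition above) =====
theorem dnaToNum_spec : Claim_equal_dnaToNum := by
  intro s _
  unfold Spec_dnaToNum
  rw [dnaToNum_eq_counts, dnaToNum_alt_eq_counts]
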